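-- pv_equiv track=rewrite | github.com/elektito/finglish | finglish/f2p.py | variations
-- ===== SOURCE A (Python) =====
-- def variations(word):
--     """Create variations of the word based on letter combinations like oo,
-- sh, etc."""
--
--     if len(word) == 1:
--         return [[word[0]]]
--     elif word == 'aa':
--         return [['A']]
--     elif word == 'ee':
--         return [['i']]
--     elif word == 'ei':
--         return [['ei']]
--     elif word in ['oo', 'ou']:
--         return [['u']]
--     elif word == 'kha':
--         return [['kha'], ['kh', 'a']]
--     elif word in ['kh', 'gh', 'ch', 'sh', 'zh', 'ck']:
--         return [[word]]
--     elif word in ["'ee", "'ei"]: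
--         return [["'i"]]
--     elif word in ["'oo", "'ou"]:
--         return [["'u"]]
--     elif word in ["a'", "e'", "o'", "i'", "u'", "A'"]:
--         return [[word[0] + "'"]]
--     elif word in ["'a", "'e", "'o", "'i", "'u", "'A"]:
--         return [["'" + word[1]]]
--     elif len(word) == 2 and word[0] == word[1]:
--         return [[word[0]]]
--
--     if word[:2] == 'aa':
--         return [['A'] + i for i in variations(word[2:])]
--     elif word[:2] == 'ee':
--         return [['i'] + i for i in variations(word[2:])]
--     elif word[:2] in ['oo', 'ou']:
--         return [['u'] + i for i in variations(word[2:])]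
--     elif word[:3] == 'kha':
--         return \
--             [['kha'] + i for i in variations(word[3:])] + \
--             [['kh', 'a'] + i for i in variations(word[3:])] + \
--             [['k', 'h', 'a'] + i for i in variations(word[3:])]
--     elif word[:2] in ['kh', 'gh', 'ch', 'sh', 'zh', 'ck']:
--         return \
--             [[word[:2]] + i for i in variations(word[2:])] + \
--             [[word[0]] + i for i in variations(word[1:])]
--     elif word[:2] in ["a'", "e'", "o'", "i'", "u'", "A'"]:
--         return [[word[:2]] + i for i in variations(word[2:])]
--     elif word[:3] in ["'ee", "'ei"]:
--         return [["'i"] + i for i in variations(word[3:])]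
--     elif word[:3] in ["'oo", "'ou"]:
--         return [["'u"] + i for i in variations(word[3:])]
--     elif word[:2] in ["'a", "'e", "'o", "'i", "'u", "'A"]:
--         return [[word[:2]] + i for i in variations(word[2:])]
--     elif len(word) >= 2 and word[0] == word[1]:
--         return [[word[0]] + i for i in variations(word[2:])]
--     else:
--         return [[word[0]] + i for i in variations(word[1:])]
-- ===== SOURCE B (Python) =====
-- _TERMINALS = {
--     'aa': [['A']], 'ee': [['i']], 'ei': [['ei']], 'oo': [['u']], 'ou': [['u']],
--     'kha': [['kha'], ['kh', 'a']],
--     'kh': [['kh']], 'gh': [['gh']], 'ch': [['ch']], 'sh': [['sh']], 'zh': [['zh']], 'ck': [['ck']],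
--     "'ee": [["'i"]], "'ei": [["'i"]], "'oo": [["'u"]], "'ou": [["'u"]],
--     "a'": [["a'"]], "e'": [["e'"]], "o'": [["o'"]], "i'": [["i'"]], "u'": [["u'"]], "A'": [["A'"]],
--     "'a": [["'a"]], "'e": [["'e"]], "'o": [["'o"]], "'i": [["'i"]], "'u": [["'u"]], "'A": [["'A"]],
-- }
--
-- _PREFIX_RULES = [
--     ('aa', [(['A'], 2)]),
--     ('ee', [(['i'], 2)]),
--     ('oo', [(['u'], 2)]),
--     ('ou', [(['u'], 2)]),
--     ('kha', [(['kha'], 3), (['kh', 'a'], 3), (['k', 'h', 'a'], 3)]),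
--     ('kh', [(['kh'], 2), (['k'], 1)]),
--     ('gh', [(['gh'], 2), (['g'], 1)]),
--     ('ch', [(['ch'], 2), (['c'], 1)]),
--     ('sh', [(['sh'], 2), (['s'], 1)]),
--     ('zh', [(['zh'], 2), (['z'], 1)]),
--     ('ck', [(['ck'], 2), (['c'], 1)]),
--     ("a'", [(["a'"], 2)]), ("e'", [(["e'"], 2)]), ("o'", [(["o'"], 2)]),
--     ("i'", [(["i'"], 2)]), ("u'", [(["u'"], 2)]), ("A'", [(["A'"], 2)]),
--     ("'ee", [(["'i"], 3)]),
--     ("'ei", [(["'i"], 3)]),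
--     ("'oo", [(["'u"], 3)]),
--     ("'ou", [(["'u"], 3)]),
--     ("'a", [(["'a"], 2)]), ("'e", [(["'e"], 2)]), ("'o", [(["'o"], 2)]),
--     ("'i", [(["'i"], 2)]), ("'u", [(["'u"], 2)]), ("'A", [(["'A"], 2)]),
-- ]
--
--
-- def _terminal(head, m):
--     """Variants of a terminal suffix (head = its first 3 chars, m = its
--     length), or None if the suffix is not terminal."""
--     if m == 1:
--         return [[head]]
--     if m <= 3:
--         r = _TERMINALS.get(head)
--         if r is not None:
--             return r
--     if m == 2 and head[0] == head[1]:
--         return [[head[0]]]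
--     return None
--
--
-- def _moves(head):
--     """First matching (tokens, advance) options for a non-terminal suffix."""
--     for pat, opts in _PREFIX_RULES:
--         if head.startswith(pat):
--             return opts
--     if head[0] == head[1]:
--         return [([head[0]], 2)]
--     return [([head[0]], 1)]
--
--
-- def variations(word):
--     """Create variations of the word based on letter combinations like oo,
-- sh, etc."""
--     n = len(word)
--     # res[i] = variations of word[i:], filled right to left; each suffix is
--     # solved exactly once and its (read-only) result shared by all callers.
--     res = [None] * (n + 1)
--     for i in range(n - 1, -1, -1):
--         head = word[i:i + 3]
--         t = _terminal(head, n - i)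
--         if t is not None:
--             res[i] = t
--         else:
--             res[i] = [toks + tail
--                       for toks, adv in _moves(head)
--                       for tail in res[i + adv]]
--     return res[0]
-- ===== Notes on version B (the rewrite author's own statement) =====
-- stated objective: alternative
-- what changed: Replaces A's naive recursion and hard-coded elif chains by a table-driven bottom-up dynamic program: the letter-combination rules become data (a terminal dict and an ordered prefix-rule list scanned by a generic matcher), and a single right-to-left pass computes res[i] = variations(word[i:]) once per suffix, sharing results instead of re-solving suffixes at every branching call.
import Mathlib
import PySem

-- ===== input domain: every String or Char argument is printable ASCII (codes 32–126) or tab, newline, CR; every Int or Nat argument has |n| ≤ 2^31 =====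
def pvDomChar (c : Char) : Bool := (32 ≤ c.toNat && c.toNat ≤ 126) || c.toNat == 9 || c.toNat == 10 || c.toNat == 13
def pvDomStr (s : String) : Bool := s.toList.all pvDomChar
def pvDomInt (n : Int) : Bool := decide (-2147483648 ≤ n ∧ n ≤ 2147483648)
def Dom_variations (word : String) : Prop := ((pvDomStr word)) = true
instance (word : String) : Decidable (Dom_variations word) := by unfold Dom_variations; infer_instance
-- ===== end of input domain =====

-- B replaces A's naive recursion over the word by a table-driven bottom-up DP: the letter
-- rules become data (terminal dict + ordered prefix-rule list, generic matcher) and each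
-- suffix's variations are computed once, right to left — an alternative of the same cost.


-- ===== PORT A =====
-- literal port of A over List Char (string comparisons become char-list comparisons;
-- word[:2]/word[:3] prefix tests become tests on the leading chars / rest.take 1)
def varsA : List Char → List (List String)
  | [] => []          -- unreachable under Pre_ (Python recurses forever / RecursionError on '')
  | [c] => [[String.ofList [c]]]
  | c1 :: c2 :: rest =>
    if c1 :: c2 :: rest = ['a','a'] then [["A"]]
    else if c1 :: c2 :: rest = ['e','e'] then [["i"]]
    else if c1 :: c2 :: rest = ['e','i'] then [["ei"]]
    else if c1 :: c2 :: rest = ['o','o'] ∨ c1 :: c2 :: rest = ['o','u'] then [["u"]]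
    else if c1 :: c2 :: rest = ['k','h','a'] then [["kha"], ["kh","a"]]
    else if c1 :: c2 :: rest = ['k','h'] ∨ c1 :: c2 :: rest = ['g','h'] ∨ c1 :: c2 :: rest = ['c','h'] ∨
            c1 :: c2 :: rest = ['s','h'] ∨ c1 :: c2 :: rest = ['z','h'] ∨ c1 :: c2 :: rest = ['c','k'] then
      [[String.ofList [c1,c2]]]
    else if c1 :: c2 :: rest = ['\'','e','e'] ∨ c1 :: c2 :: rest = ['\'','e','i'] then [["'i"]]
    else if c1 :: c2 :: rest = ['\'','o','o'] ∨ c1 :: c2 :: rest = ['\'','o','u'] then [["'u"]]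
    else if rest = [] ∧ c2 = '\'' ∧ (c1 = 'a' ∨ c1 = 'e' ∨ c1 = 'o' ∨ c1 = 'i' ∨ c1 = 'u' ∨ c1 = 'A') then
      [[String.ofList [c1, '\'']]]
    else if rest = [] ∧ c1 = '\'' ∧ (c2 = 'a' ∨ c2 = 'e' ∨ c2 = 'o' ∨ c2 = 'i' ∨ c2 = 'u' ∨ c2 = 'A') then
      [[String.ofList ['\'', c2]]]
    else if rest = [] ∧ c1 = c2 then [[String.ofList [c1]]]
    -- prefix section
    else if c1 = 'a' ∧ c2 = 'a' then (varsA rest).map (fun i => "A" :: i)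
    else if c1 = 'e' ∧ c2 = 'e' then (varsA rest).map (fun i => "i" :: i)
    else if (c1 = 'o' ∧ c2 = 'o') ∨ (c1 = 'o' ∧ c2 = 'u') then (varsA rest).map (fun i => "u" :: i)
    else if c1 = 'k' ∧ c2 = 'h' ∧ rest.take 1 = ['a'] then
      (varsA (rest.drop 1)).map (fun i => "kha" :: i) ++
      (varsA (rest.drop 1)).map (fun i => "kh" :: "a" :: i) ++
      (varsA (rest.drop 1)).map (fun i => "k" :: "h" :: "a" :: i)
    else if (c1 = 'k' ∧ c2 = 'h') ∨ (c1 = 'g' ∧ c2 = 'h') ∨ (c1 = 'c' ∧ c2 = 'h') ∨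
            (c1 = 's' ∧ c2 = 'h') ∨ (c1 = 'z' ∧ c2 = 'h') ∨ (c1 = 'c' ∧ c2 = 'k') then
      (varsA rest).map (fun i => String.ofList [c1,c2] :: i) ++
      (varsA (c2 :: rest)).map (fun i => String.ofList [c1] :: i)
    else if c2 = '\'' ∧ (c1 = 'a' ∨ c1 = 'e' ∨ c1 = 'o' ∨ c1 = 'i' ∨ c1 = 'u' ∨ c1 = 'A') then
      (varsA rest).map (fun i => String.ofList [c1,c2] :: i)
    else if c1 = '\'' ∧ c2 = 'e' ∧ (rest.take 1 = ['e'] ∨ rest.take 1 = ['i']) then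
      (varsA (rest.drop 1)).map (fun i => "'i" :: i)
    else if c1 = '\'' ∧ c2 = 'o' ∧ (rest.take 1 = ['o'] ∨ rest.take 1 = ['u']) then
      (varsA (rest.drop 1)).map (fun i => "'u" :: i)
    else if c1 = '\'' ∧ (c2 = 'a' ∨ c2 = 'e' ∨ c2 = 'o' ∨ c2 = 'i' ∨ c2 = 'u' ∨ c2 = 'A') then
      (varsA rest).map (fun i => String.ofList [c1,c2] :: i)
    else if c1 = c2 then (varsA rest).map (fun i => String.ofList [c1] :: i)
    else (varsA (c2 :: rest)).map (fun i => String.ofList [c1] :: i)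
  termination_by cs => cs.length
  decreasing_by all_goals simp; all_goals omega

def variations (word : String) : List (List String) := varsA word.toList

-- ===== PORT B =====
-- port of Source B: the _TERMINALS dict and the ordered _PREFIX_RULES list become association
-- lists of String keys (lookup = first match, keys distinct, as in the Python dict / rule
-- scan); _terminal/_moves are the generic matchers; tabB is the right-to-left DP loop
-- (tabB cs = [res[i], res[i+1], …] for the suffixes of cs, so res[i+adv] is t.getD (adv-1))
def termRules : List (String × List (List String)) :=
  [("aa", [["A"]]), ("ee", [["i"]]), ("ei", [["ei"]]), ("oo", [["u"]]), ("ou", [["u"]]),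
   ("kha", [["kha"], ["kh","a"]]),
   ("kh", [["kh"]]), ("gh", [["gh"]]), ("ch", [["ch"]]), ("sh", [["sh"]]),
   ("zh", [["zh"]]), ("ck", [["ck"]]),
   ("'ee", [["'i"]]), ("'ei", [["'i"]]), ("'oo", [["'u"]]), ("'ou", [["'u"]]),
   ("a'", [["a'"]]), ("e'", [["e'"]]), ("o'", [["o'"]]),
   ("i'", [["i'"]]), ("u'", [["u'"]]), ("A'", [["A'"]]),
   ("'a", [["'a"]]), ("'e", [["'e"]]), ("'o", [["'o"]]),
   ("'i", [["'i"]]), ("'u", [["'u"]]), ("'A", [["'A"]])]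

def prefRules : List (String × List (List String × Nat)) :=
  [("aa", [(["A"], 2)]), ("ee", [(["i"], 2)]), ("oo", [(["u"], 2)]), ("ou", [(["u"], 2)]),
   ("kha", [(["kha"], 3), (["kh","a"], 3), (["k","h","a"], 3)]),
   ("kh", [(["kh"], 2), (["k"], 1)]), ("gh", [(["gh"], 2), (["g"], 1)]),
   ("ch", [(["ch"], 2), (["c"], 1)]), ("sh", [(["sh"], 2), (["s"], 1)]),
   ("zh", [(["zh"], 2), (["z"], 1)]), ("ck", [(["ck"], 2), (["c"], 1)]),
   ("a'", [(["a'"], 2)]), ("e'", [(["e'"], 2)]), ("o'", [(["o'"], 2)]),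
   ("i'", [(["i'"], 2)]), ("u'", [(["u'"], 2)]), ("A'", [(["A'"], 2)]),
   ("'ee", [(["'i"], 3)]), ("'ei", [(["'i"], 3)]), ("'oo", [(["'u"], 3)]), ("'ou", [(["'u"], 3)]),
   ("'a", [(["'a"], 2)]), ("'e", [(["'e"], 2)]), ("'o", [(["'o"], 2)]),
   ("'i", [(["'i"], 2)]), ("'u", [(["'u"], 2)]), ("'A", [(["'A"], 2)])]

def termB (head : List Char) (m : Nat) : Option (List (List String)) :=
  if m = 1 then some [[String.ofList head]]
  else
    match (if m ≤ 3 then (termRules.find? (fun r => r.1.toList == head)).map (·.2) else none) with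
    | some r => some r
    | none =>
      match head with
      | h1 :: h2 :: _ => if m = 2 ∧ h1 = h2 then some [[String.ofList [h1]]] else none
      | _ => none

def movesB (head : List Char) : List (List String × Nat) :=
  match prefRules.find? (fun r => r.1.toList.isPrefixOf head) with
  | some r => r.2
  | none =>
    match head with
    | h1 :: h2 :: _ => if h1 = h2 then [([String.ofList [h1]], 2)] else [([String.ofList [h1]], 1)]
    | _ => []          -- unreachable: _moves is only reached for suffixes of length ≥ 2

def tabB : List Char → List (List (List String))
  | [] => []
  | c :: cs =>
    let t := tabB cs
    let r :=
      match termB ((c :: cs).take 3) ((c :: cs).length) with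
      | some b => b
      | none => (movesB ((c :: cs).take 3)).flatMap
          (fun p => (t.getD (p.2 - 1) []).map (fun tail => p.1 ++ tail))
    r :: t

def variations_alt (word : String) : List (List String) := (tabB word.toList).headD []

-- ===== PRECONDITION & SPEC =====
-- Pre_ excludes only the empty string, on which A recurses forever (RecursionError).
def Pre_variations (word : String) : Prop := word ≠ ""
instance (word : String) : Decidable (Pre_variations word) := by unfold Pre_variations; infer_instance
def pvWitness_variations : String := "khash"
def Spec_variations (word : String) (out : List (List String)) : Prop := out = variations_alt word
instance (word : String) (out : List (List String)) : Decidable (Spec_variations word out) := by unfold Spec_variations; infer_instance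

-- ===== CLAIM =====
def Claim_equal_variations : Prop := ∀ (word : String), Dom_variations word → Pre_variations word → Spec_variations word (variations word)

-- ===== LEMMAS AND PROOFS =====
-- expected table: varsA on every nonempty suffix
def tailsVars : List Char → List (List (List String))
  | [] => []
  | c :: cs => varsA (c :: cs) :: tailsVars cs

set_option maxHeartbeats 1000000 in
-- _moves on a doubled first letter that no prefix rule matches
theorem movesB_diag (c : Char) (ts : List Char)
    (ha : ¬ c = 'a') (he : ¬ c = 'e') (ho : ¬ c = 'o') :
    movesB ((c :: c :: ts).take 3) = [([String.ofList [c]], 2)] := by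
  cases ts with
  | nil =>
    have hnone : prefRules.find? (fun p => p.1.toList.isPrefixOf [c, c]) = none := by
      apply List.find?_eq_none.mpr
      intro x hx
      fin_cases hx <;> simp [List.isPrefixOf] <;> (intros; subst_vars; simp_all [@eq_comm Char])
    simp [movesB, hnone]
  | cons r rs =>
    have hnone : prefRules.find? (fun p => p.1.toList.isPrefixOf [c, c, r]) = none := by
      apply List.find?_eq_none.mpr
      intro x hx
      fin_cases hx <;> simp [List.isPrefixOf] <;> (intros; subst_vars; simp_all [@eq_comm Char])
    simp [movesB, hnone]

set_option maxHeartbeats 1000000 in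
-- _moves on a suffix that no prefix rule and no doubled letter matches
theorem movesB_other (c1 c2 : Char) (ts : List Char)
    (h1 : ¬ (c1 = 'a' ∧ c2 = 'a'))
    (h2 : ¬ (c1 = 'e' ∧ c2 = 'e'))
    (h3 : ¬ ((c1 = 'o' ∧ c2 = 'o') ∨ (c1 = 'o' ∧ c2 = 'u')))
    (h4 : ¬ (c1 = 'k' ∧ c2 = 'h' ∧ ts.take 1 = ['a']))
    (h5 : ¬ ((c1 = 'k' ∧ c2 = 'h') ∨ (c1 = 'g' ∧ c2 = 'h') ∨ (c1 = 'c' ∧ c2 = 'h') ∨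
             (c1 = 's' ∧ c2 = 'h') ∨ (c1 = 'z' ∧ c2 = 'h') ∨ (c1 = 'c' ∧ c2 = 'k')))
    (h6 : ¬ (c2 = '\'' ∧ (c1 = 'a' ∨ c1 = 'e' ∨ c1 = 'o' ∨ c1 = 'i' ∨ c1 = 'u' ∨ c1 = 'A')))
    (h7 : ¬ (c1 = '\'' ∧ c2 = 'e' ∧ (ts.take 1 = ['e'] ∨ ts.take 1 = ['i'])))
    (h8 : ¬ (c1 = '\'' ∧ c2 = 'o' ∧ (ts.take 1 = ['o'] ∨ ts.take 1 = ['u'])))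
    (h9 : ¬ (c1 = '\'' ∧ (c2 = 'a' ∨ c2 = 'e' ∨ c2 = 'o' ∨ c2 = 'i' ∨ c2 = 'u' ∨ c2 = 'A')))
    (h10 : ¬ c1 = c2) :
    movesB ((c1 :: c2 :: ts).take 3) = [([String.ofList [c1]], 1)] := by
  cases ts with
  | nil =>
    have hnone : prefRules.find? (fun p => p.1.toList.isPrefixOf [c1, c2]) = none := by
      apply List.find?_eq_none.mpr
      intro x hx
      fin_cases hx <;> simp [List.isPrefixOf] <;> (intros; subst_vars; simp_all [@eq_comm Char])
    simp [movesB, hnone, h10]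
  | cons r rs =>
    have hnone : prefRules.find? (fun p => p.1.toList.isPrefixOf [c1, c2, r]) = none := by
      apply List.find?_eq_none.mpr
      intro x hx
      fin_cases hx <;> simp [List.isPrefixOf] <;> (intros; subst_vars; simp_all [@eq_comm Char])
    simp [movesB, hnone, h10]

set_option maxHeartbeats 2000000 in
-- _moves computes exactly A's prefix-section choice, branch for branch
theorem movesB_char (c1 c2 : Char) (ts : List Char) :
    movesB ((c1 :: c2 :: ts).take 3) =
    (if c1 = 'a' ∧ c2 = 'a' then [(["A"], 2)]
    else if c1 = 'e' ∧ c2 = 'e' then [(["i"], 2)]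
    else if (c1 = 'o' ∧ c2 = 'o') ∨ (c1 = 'o' ∧ c2 = 'u') then [(["u"], 2)]
    else if c1 = 'k' ∧ c2 = 'h' ∧ ts.take 1 = ['a'] then
      [(["kha"], 3), (["kh","a"], 3), (["k","h","a"], 3)]
    else if (c1 = 'k' ∧ c2 = 'h') ∨ (c1 = 'g' ∧ c2 = 'h') ∨ (c1 = 'c' ∧ c2 = 'h') ∨
            (c1 = 's' ∧ c2 = 'h') ∨ (c1 = 'z' ∧ c2 = 'h') ∨ (c1 = 'c' ∧ c2 = 'k') then
      [([String.ofList [c1,c2]], 2), ([String.ofList [c1]], 1)]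
    else if c2 = '\'' ∧ (c1 = 'a' ∨ c1 = 'e' ∨ c1 = 'o' ∨ c1 = 'i' ∨ c1 = 'u' ∨ c1 = 'A') then
      [([String.ofList [c1,c2]], 2)]
    else if c1 = '\'' ∧ c2 = 'e' ∧ (ts.take 1 = ['e'] ∨ ts.take 1 = ['i']) then [(["'i"], 3)]
    else if c1 = '\'' ∧ c2 = 'o' ∧ (ts.take 1 = ['o'] ∨ ts.take 1 = ['u']) then [(["'u"], 3)]
    else if c1 = '\'' ∧ (c2 = 'a' ∨ c2 = 'e' ∨ c2 = 'o' ∨ c2 = 'i' ∨ c2 = 'u' ∨ c2 = 'A') then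
      [([String.ofList [c1,c2]], 2)]
    else if c1 = c2 then [([String.ofList [c1]], 2)]
    else [([String.ofList [c1]], 1)]) := by
  cases ts with
  | nil =>
    split_ifs with h1 h2 h3 h4 h5 h6 h7 h8 h9 h10
    · obtain ⟨rfl, rfl⟩ := h1; decide
    · obtain ⟨rfl, rfl⟩ := h2; decide
    · rcases h3 with ⟨rfl, rfl⟩ | ⟨rfl, rfl⟩ <;> decide
    · simp at h4
    · rcases h5 with ⟨rfl, rfl⟩ | ⟨rfl, rfl⟩ | ⟨rfl, rfl⟩ | ⟨rfl, rfl⟩ | ⟨rfl, rfl⟩ | ⟨rfl, rfl⟩ <;> decide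
    · obtain ⟨rfl, rfl | rfl | rfl | rfl | rfl | rfl⟩ := h6 <;> decide
    · simp at h7
    · simp at h8
    · obtain ⟨rfl, rfl | rfl | rfl | rfl | rfl | rfl⟩ := h9 <;> decide
    · obtain rfl := h10
      exact movesB_diag _ _ (fun a => h1 ⟨a, a⟩) (fun a => h2 ⟨a, a⟩) (fun a => h3 (Or.inl ⟨a, a⟩))
    · exact movesB_other _ _ _ h1 h2 h3 h4 h5 h6 h7 h8 h9 h10
  | cons r rs =>
    split_ifs with h1 h2 h3 h4 h5 h6 h7 h8 h9 h10
    · obtain ⟨rfl, rfl⟩ := h1; simp [movesB, prefRules, List.isPrefixOf]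
    · obtain ⟨rfl, rfl⟩ := h2; simp [movesB, prefRules, List.find?, List.isPrefixOf]
    · rcases h3 with ⟨rfl, rfl⟩ | ⟨rfl, rfl⟩ <;> simp [movesB, prefRules, List.find?, List.isPrefixOf]
    · obtain ⟨rfl, rfl, h⟩ := h4; simp at h; obtain rfl := h
      simp [movesB, prefRules, List.find?, List.isPrefixOf]
    · rcases h5 with ⟨rfl, rfl⟩ | ⟨rfl, rfl⟩ | ⟨rfl, rfl⟩ | ⟨rfl, rfl⟩ | ⟨rfl, rfl⟩ | ⟨rfl, rfl⟩
      · have hr : ('a' == r) = false := by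
          have hne : ¬ ('a' = r) := fun h => h4 ⟨rfl, rfl, by simp [← h]⟩
          simpa using hne
        simp [movesB, prefRules, List.find?, List.isPrefixOf, hr]
      all_goals simp [movesB, prefRules, List.find?, List.isPrefixOf]
    · obtain ⟨rfl, rfl | rfl | rfl | rfl | rfl | rfl⟩ := h6 <;>
        simp [movesB, prefRules, List.find?, List.isPrefixOf]
    · obtain ⟨rfl, rfl, h⟩ := h7; simp at h
      rcases h with rfl | rfl <;> simp [movesB, prefRules, List.find?, List.isPrefixOf]
    · obtain ⟨rfl, rfl, h⟩ := h8; simp at h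
      rcases h with rfl | rfl <;> simp [movesB, prefRules, List.find?, List.isPrefixOf]
    · obtain ⟨rfl, hv⟩ := h9
      rcases hv with rfl | rfl | rfl | rfl | rfl | rfl
      · simp [movesB, prefRules, List.find?, List.isPrefixOf]
      · have he2 : ('e' == r) = false := by
          have hne : ¬ ('e' = r) := fun h => h7 ⟨rfl, rfl, Or.inl (by simp [← h])⟩
          simpa using hne
        have hi2 : ('i' == r) = false := by
          have hne : ¬ ('i' = r) := fun h => h7 ⟨rfl, rfl, Or.inr (by simp [← h])⟩
          simpa using hne
        simp [movesB, prefRules, List.find?, List.isPrefixOf, he2, hi2]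
      · have ho2 : ('o' == r) = false := by
          have hne : ¬ ('o' = r) := fun h => h8 ⟨rfl, rfl, Or.inl (by simp [← h])⟩
          simpa using hne
        have hu2 : ('u' == r) = false := by
          have hne : ¬ ('u' = r) := fun h => h8 ⟨rfl, rfl, Or.inr (by simp [← h])⟩
          simpa using hne
        simp [movesB, prefRules, List.find?, List.isPrefixOf, ho2, hu2]
      · simp [movesB, prefRules, List.find?, List.isPrefixOf]
      · simp [movesB, prefRules, List.find?, List.isPrefixOf]
      · simp [movesB, prefRules, List.find?, List.isPrefixOf]
    · obtain rfl := h10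
      exact movesB_diag _ _ (fun a => h1 ⟨a, a⟩) (fun a => h2 ⟨a, a⟩) (fun a => h3 (Or.inl ⟨a, a⟩))
    · exact movesB_other _ _ _ h1 h2 h3 h4 h5 h6 h7 h8 h9 h10

set_option maxHeartbeats 1000000 in
-- _terminal on a doubled two-letter suffix no dict key matches
theorem termB_diag (c : Char) (ha : ¬ c = 'a') (he : ¬ c = 'e') (ho : ¬ c = 'o') :
    termB [c, c] 2 = some [[String.ofList [c]]] := by
  have hnone : termRules.find? (fun p => p.1.toList == [c, c]) = none := by
    apply List.find?_eq_none.mpr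
    intro x hx
    fin_cases hx <;> simp <;> (intros; subst_vars; simp_all [@eq_comm Char])
  simp [termB, hnone]

set_option maxHeartbeats 1000000 in
-- _terminal on a two-letter suffix that is not terminal
theorem termB_two_none (c1 c2 : Char)
    (n1 : ¬ (c1 = 'a' ∧ c2 = 'a')) (n2 : ¬ (c1 = 'e' ∧ c2 = 'e')) (n3 : ¬ (c1 = 'e' ∧ c2 = 'i'))
    (n4 : ¬ ((c1 = 'o' ∧ c2 = 'o') ∨ (c1 = 'o' ∧ c2 = 'u')))
    (n5 : ¬ ((c1 = 'k' ∧ c2 = 'h') ∨ (c1 = 'g' ∧ c2 = 'h') ∨ (c1 = 'c' ∧ c2 = 'h') ∨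
             (c1 = 's' ∧ c2 = 'h') ∨ (c1 = 'z' ∧ c2 = 'h') ∨ (c1 = 'c' ∧ c2 = 'k')))
    (n6 : ¬ (c2 = '\'' ∧ (c1 = 'a' ∨ c1 = 'e' ∨ c1 = 'o' ∨ c1 = 'i' ∨ c1 = 'u' ∨ c1 = 'A')))
    (n7 : ¬ (c1 = '\'' ∧ (c2 = 'a' ∨ c2 = 'e' ∨ c2 = 'o' ∨ c2 = 'i' ∨ c2 = 'u' ∨ c2 = 'A')))
    (n8 : ¬ c1 = c2) :
    termB [c1, c2] 2 = none := by
  have hnone : termRules.find? (fun p => p.1.toList == [c1, c2]) = none := by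
    apply List.find?_eq_none.mpr
    intro x hx
    fin_cases hx <;> simp <;> (intros; subst_vars; simp_all [@eq_comm Char])
  simp [termB, hnone, n8]

set_option maxHeartbeats 1000000 in
-- _terminal on a three-letter suffix that is not terminal
theorem termB_three_none (c1 c2 r : Char)
    (k1 : ¬ (c1 = 'k' ∧ c2 = 'h' ∧ r = 'a'))
    (k2 : ¬ (c1 = '\'' ∧ c2 = 'e' ∧ r = 'e')) (k3 : ¬ (c1 = '\'' ∧ c2 = 'e' ∧ r = 'i'))
    (k4 : ¬ (c1 = '\'' ∧ c2 = 'o' ∧ r = 'o')) (k5 : ¬ (c1 = '\'' ∧ c2 = 'o' ∧ r = 'u')) :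
    termB [c1, c2, r] 3 = none := by
  have hnone : termRules.find? (fun p => p.1.toList == [c1, c2, r]) = none := by
    apply List.find?_eq_none.mpr
    intro x hx
    fin_cases hx <;> simp <;> (intros; subst_vars; simp_all [@eq_comm Char])
  simp [termB, hnone]

-- _terminal never fires on suffixes of length ≥ 4
theorem termB_long_none (c1 c2 r : Char) (m : Nat) (hm : 4 ≤ m) :
    termB [c1, c2, r] m = none := by
  have hm1 : ¬ (m = 1) := by omega
  have hm3 : ¬ (m ≤ 3) := by omega
  have hm2 : ¬ (m = 2) := by omega
  simp [termB, hm1, hm3, hm2]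

set_option maxHeartbeats 1000000 in
-- _terminal computes exactly A's terminal chain, branch for branch
theorem termB_char (c1 c2 : Char) (ts : List Char) :
    termB ((c1 :: c2 :: ts).take 3) ((c1 :: c2 :: ts).length) =
    (if c1 :: c2 :: ts = ['a','a'] then some [["A"]]
    else if c1 :: c2 :: ts = ['e','e'] then some [["i"]]
    else if c1 :: c2 :: ts = ['e','i'] then some [["ei"]]
    else if c1 :: c2 :: ts = ['o','o'] ∨ c1 :: c2 :: ts = ['o','u'] then some [["u"]]
    else if c1 :: c2 :: ts = ['k','h','a'] then some [["kha"], ["kh","a"]]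
    else if c1 :: c2 :: ts = ['k','h'] ∨ c1 :: c2 :: ts = ['g','h'] ∨ c1 :: c2 :: ts = ['c','h'] ∨
            c1 :: c2 :: ts = ['s','h'] ∨ c1 :: c2 :: ts = ['z','h'] ∨ c1 :: c2 :: ts = ['c','k'] then
      some [[String.ofList [c1,c2]]]
    else if c1 :: c2 :: ts = ['\'','e','e'] ∨ c1 :: c2 :: ts = ['\'','e','i'] then some [["'i"]]
    else if c1 :: c2 :: ts = ['\'','o','o'] ∨ c1 :: c2 :: ts = ['\'','o','u'] then some [["'u"]]
    else if ts = [] ∧ c2 = '\'' ∧ (c1 = 'a' ∨ c1 = 'e' ∨ c1 = 'o' ∨ c1 = 'i' ∨ c1 = 'u' ∨ c1 = 'A') then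
      some [[String.ofList [c1, '\'']]]
    else if ts = [] ∧ c1 = '\'' ∧ (c2 = 'a' ∨ c2 = 'e' ∨ c2 = 'o' ∨ c2 = 'i' ∨ c2 = 'u' ∨ c2 = 'A') then
      some [[String.ofList ['\'', c2]]]
    else if ts = [] ∧ c1 = c2 then some [[String.ofList [c1]]]
    else none) := by
  by_cases h1 : c1 :: c2 :: ts = ['a','a']
  · simp only [if_pos h1]; rw [h1]; decide
  simp only [if_neg h1]
  by_cases h2 : c1 :: c2 :: ts = ['e','e']
  · simp only [if_pos h2]; rw [h2]; decide
  simp only [if_neg h2]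
  by_cases h3 : c1 :: c2 :: ts = ['e','i']
  · simp only [if_pos h3]; rw [h3]; decide
  simp only [if_neg h3]
  by_cases h4 : c1 :: c2 :: ts = ['o','o'] ∨ c1 :: c2 :: ts = ['o','u']
  · simp only [if_pos h4]
    rcases h4 with h4 | h4 <;> rw [h4] <;> decide
  simp only [if_neg h4]
  by_cases h5 : c1 :: c2 :: ts = ['k','h','a']
  · simp only [if_pos h5]; rw [h5]; decide
  simp only [if_neg h5]
  by_cases h6 : c1 :: c2 :: ts = ['k','h'] ∨ c1 :: c2 :: ts = ['g','h'] ∨ c1 :: c2 :: ts = ['c','h'] ∨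
      c1 :: c2 :: ts = ['s','h'] ∨ c1 :: c2 :: ts = ['z','h'] ∨ c1 :: c2 :: ts = ['c','k']
  · simp only [if_pos h6]
    rcases h6 with h6 | h6 | h6 | h6 | h6 | h6 <;>
      (rcases (by simpa using h6 : c1 = _ ∧ c2 = _ ∧ ts = []) with ⟨rfl, rfl, rfl⟩; decide)
  simp only [if_neg h6]
  by_cases h7 : c1 :: c2 :: ts = ['\'','e','e'] ∨ c1 :: c2 :: ts = ['\'','e','i']
  · simp only [if_pos h7]
    rcases h7 with h7 | h7 <;> rw [h7] <;> decide
  simp only [if_neg h7]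
  by_cases h8 : c1 :: c2 :: ts = ['\'','o','o'] ∨ c1 :: c2 :: ts = ['\'','o','u']
  · simp only [if_pos h8]
    rcases h8 with h8 | h8 <;> rw [h8] <;> decide
  simp only [if_neg h8]
  by_cases h9 : ts = [] ∧ c2 = '\'' ∧ (c1 = 'a' ∨ c1 = 'e' ∨ c1 = 'o' ∨ c1 = 'i' ∨ c1 = 'u' ∨ c1 = 'A')
  · simp only [if_pos h9]
    obtain ⟨rfl, rfl, rfl | rfl | rfl | rfl | rfl | rfl⟩ := h9 <;> decide
  simp only [if_neg h9]
  by_cases h10 : ts = [] ∧ c1 = '\'' ∧ (c2 = 'a' ∨ c2 = 'e' ∨ c2 = 'o' ∨ c2 = 'i' ∨ c2 = 'u' ∨ c2 = 'A')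
  · simp only [if_pos h10]
    obtain ⟨rfl, rfl, rfl | rfl | rfl | rfl | rfl | rfl⟩ := h10 <;> decide
  simp only [if_neg h10]
  by_cases h11 : ts = [] ∧ c1 = c2
  · simp only [if_pos h11]
    obtain ⟨rfl, h⟩ := h11
    rcases h with rfl
    exact termB_diag c1 (fun a => h1 (by rw [a])) (fun a => h2 (by rw [a]))
      (fun a => h4 (Or.inl (by rw [a])))
  simp only [if_neg h11]
  cases ts with
  | nil =>
    exact termB_two_none c1 c2
      (fun q => h1 (by rw [q.1, q.2])) (fun q => h2 (by rw [q.1, q.2])) (fun q => h3 (by rw [q.1, q.2]))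
      (fun hp => hp.elim (fun q => h4 (Or.inl (by rw [q.1, q.2]))) (fun q => h4 (Or.inr (by rw [q.1, q.2]))))
      (fun hp => by
        rcases hp with q|q|q|q|q|q
        · exact h6 (Or.inl (by rw [q.1, q.2]))
        · exact h6 (Or.inr (Or.inl (by rw [q.1, q.2])))
        · exact h6 (Or.inr (Or.inr (Or.inl (by rw [q.1, q.2]))))
        · exact h6 (Or.inr (Or.inr (Or.inr (Or.inl (by rw [q.1, q.2])))))
        · exact h6 (Or.inr (Or.inr (Or.inr (Or.inr (Or.inl (by rw [q.1, q.2]))))))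
        · exact h6 (Or.inr (Or.inr (Or.inr (Or.inr (Or.inr (by rw [q.1, q.2])))))))
      (fun q => h9 ⟨rfl, q.1, q.2⟩)
      (fun q => h10 ⟨rfl, q.1, q.2⟩)
      (fun q => h11 ⟨rfl, q⟩)
  | cons r rs =>
    cases rs with
    | nil =>
      exact termB_three_none c1 c2 r
        (fun q => h5 (by rw [q.1, q.2.1, q.2.2]))
        (fun q => h7 (Or.inl (by rw [q.1, q.2.1, q.2.2])))
        (fun q => h7 (Or.inr (by rw [q.1, q.2.1, q.2.2])))
        (fun q => h8 (Or.inl (by rw [q.1, q.2.1, q.2.2])))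
        (fun q => h8 (Or.inr (by rw [q.1, q.2.1, q.2.2])))
    | cons r2 rs2 =>
      exact termB_long_none c1 c2 r _ (by simp)

set_option maxHeartbeats 1000000 in
-- one DP step computes varsA of the suffix, given the table for the shorter suffixes
theorem step_eq (c : Char) (cs : List Char) (t : List (List (List String)))
    (ht : ∀ k, t.getD k [] = (tailsVars cs).getD k []) :
    (match termB ((c :: cs).take 3) ((c :: cs).length) with
      | some b => b
      | none => (movesB ((c :: cs).take 3)).flatMap
          (fun p => (t.getD (p.2 - 1) []).map (fun tail => p.1 ++ tail)))
    = varsA (c :: cs) := by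
  match cs with
  | [] => simp [termB, varsA]
  | c2 :: rest =>
    rw [varsA, termB_char, movesB_char]
    by_cases h1 : c :: c2 :: rest = ['a','a']
    · simp only [if_pos h1]
    simp only [if_neg h1]
    by_cases h2 : c :: c2 :: rest = ['e','e']
    · simp only [if_pos h2]
    simp only [if_neg h2]
    by_cases h3 : c :: c2 :: rest = ['e','i']
    · simp only [if_pos h3]
    simp only [if_neg h3]
    by_cases h4 : c :: c2 :: rest = ['o','o'] ∨ c :: c2 :: rest = ['o','u']
    · simp only [if_pos h4]
    simp only [if_neg h4]
    by_cases h5 : c :: c2 :: rest = ['k','h','a']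
    · simp only [if_pos h5]
    simp only [if_neg h5]
    by_cases h6 : c :: c2 :: rest = ['k','h'] ∨ c :: c2 :: rest = ['g','h'] ∨ c :: c2 :: rest = ['c','h'] ∨
        c :: c2 :: rest = ['s','h'] ∨ c :: c2 :: rest = ['z','h'] ∨ c :: c2 :: rest = ['c','k']
    · simp only [if_pos h6]
    simp only [if_neg h6]
    by_cases h7 : c :: c2 :: rest = ['\'','e','e'] ∨ c :: c2 :: rest = ['\'','e','i']
    · simp only [if_pos h7]
    simp only [if_neg h7]
    by_cases h8 : c :: c2 :: rest = ['\'','o','o'] ∨ c :: c2 :: rest = ['\'','o','u']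
    · simp only [if_pos h8]
    simp only [if_neg h8]
    by_cases h9 : rest = [] ∧ c2 = '\'' ∧ (c = 'a' ∨ c = 'e' ∨ c = 'o' ∨ c = 'i' ∨ c = 'u' ∨ c = 'A')
    · simp only [if_pos h9]
    simp only [if_neg h9]
    by_cases h10 : rest = [] ∧ c = '\'' ∧ (c2 = 'a' ∨ c2 = 'e' ∨ c2 = 'o' ∨ c2 = 'i' ∨ c2 = 'u' ∨ c2 = 'A')
    · simp only [if_pos h10]
    simp only [if_neg h10]
    by_cases h11 : rest = [] ∧ c = c2
    · simp only [if_pos h11]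
    simp only [if_neg h11]
    -- prefix section
    by_cases O1 : c = 'a' ∧ c2 = 'a'
    · simp only [if_pos O1]
      obtain ⟨rfl, rfl⟩ := O1
      cases rest with
      | nil => simp at h1
      | cons r rs =>
        have h' := ht 1
        simp [tailsVars] at h'
        simp [List.flatMap, h']
    simp only [if_neg O1]
    by_cases O2 : c = 'e' ∧ c2 = 'e'
    · simp only [if_pos O2]
      obtain ⟨rfl, rfl⟩ := O2
      cases rest with
      | nil => simp at h2
      | cons r rs =>
        have h' := ht 1
        simp [tailsVars] at h'
        simp [List.flatMap, h']
    simp only [if_neg O2]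
    by_cases O3 : (c = 'o' ∧ c2 = 'o') ∨ (c = 'o' ∧ c2 = 'u')
    · simp only [if_pos O3]
      rcases O3 with ⟨rfl, rfl⟩ | ⟨rfl, rfl⟩ <;>
        cases rest with
        | nil => simp at h4
        | cons r rs =>
          have h' := ht 1
          simp [tailsVars] at h'
          simp [List.flatMap, h']
    simp only [if_neg O3]
    by_cases O4 : c = 'k' ∧ c2 = 'h' ∧ rest.take 1 = ['a']
    · simp only [if_pos O4]
      obtain ⟨rfl, rfl, htake⟩ := O4
      cases rest with
      | nil => simp at htake
      | cons a rs =>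
        simp only [List.take_succ_cons, List.take_zero, List.cons.injEq, and_true] at htake
        subst htake
        cases rs with
        | nil => simp at h5
        | cons r rs' =>
          have h' := ht 2
          simp [tailsVars] at h'
          simp [List.flatMap, h']
    simp only [if_neg O4]
    by_cases O5 : (c = 'k' ∧ c2 = 'h') ∨ (c = 'g' ∧ c2 = 'h') ∨ (c = 'c' ∧ c2 = 'h') ∨
        (c = 's' ∧ c2 = 'h') ∨ (c = 'z' ∧ c2 = 'h') ∨ (c = 'c' ∧ c2 = 'k')
    · simp only [if_pos O5]
      rcases O5 with ⟨rfl, rfl⟩ | ⟨rfl, rfl⟩ | ⟨rfl, rfl⟩ | ⟨rfl, rfl⟩ | ⟨rfl, rfl⟩ | ⟨rfl, rfl⟩ <;>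
        cases rest with
        | nil => simp at h6
        | cons r rs =>
          have h'0 := ht 0
          have h'1 := ht 1
          simp [tailsVars] at h'0 h'1
          simp [List.flatMap, h'0, h'1]
    simp only [if_neg O5]
    by_cases O6 : c2 = '\'' ∧ (c = 'a' ∨ c = 'e' ∨ c = 'o' ∨ c = 'i' ∨ c = 'u' ∨ c = 'A')
    · simp only [if_pos O6]
      obtain ⟨rfl, hv⟩ := O6
      cases rest with
      | nil => exact absurd ⟨rfl, rfl, hv⟩ h9
      | cons r rs =>
        have h' := ht 1
        simp [tailsVars] at h'
        simp [List.flatMap, h']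
    simp only [if_neg O6]
    by_cases O7 : c = '\'' ∧ c2 = 'e' ∧ (rest.take 1 = ['e'] ∨ rest.take 1 = ['i'])
    · simp only [if_pos O7]
      obtain ⟨rfl, rfl, htake⟩ := O7
      cases rest with
      | nil => simp at htake
      | cons a rs =>
        simp only [List.take_succ_cons, List.take_zero, List.cons.injEq, and_true] at htake
        rcases htake with rfl | rfl <;>
          cases rs with
          | nil => simp at h7
          | cons r rs' =>
            have h' := ht 2
            simp [tailsVars] at h'
            simp [List.flatMap, h']
    simp only [if_neg O7]
    by_cases O8 : c = '\'' ∧ c2 = 'o' ∧ (rest.take 1 = ['o'] ∨ rest.take 1 = ['u'])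
    · simp only [if_pos O8]
      obtain ⟨rfl, rfl, htake⟩ := O8
      cases rest with
      | nil => simp at htake
      | cons a rs =>
        simp only [List.take_succ_cons, List.take_zero, List.cons.injEq, and_true] at htake
        rcases htake with rfl | rfl <;>
          cases rs with
          | nil => simp at h8
          | cons r rs' =>
            have h' := ht 2
            simp [tailsVars] at h'
            simp [List.flatMap, h']
    simp only [if_neg O8]
    by_cases O9 : c = '\'' ∧ (c2 = 'a' ∨ c2 = 'e' ∨ c2 = 'o' ∨ c2 = 'i' ∨ c2 = 'u' ∨ c2 = 'A')
    · simp only [if_pos O9]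
      obtain ⟨rfl, hv⟩ := O9
      cases rest with
      | nil => exact absurd ⟨rfl, rfl, hv⟩ h10
      | cons r rs =>
        have h' := ht 1
        simp [tailsVars] at h'
        simp [List.flatMap, h']
    simp only [if_neg O9]
    by_cases O10 : c = c2
    · simp only [if_pos O10]
      cases rest with
      | nil => exact absurd ⟨rfl, O10⟩ h11
      | cons r rs =>
        rcases O10 with rfl
        have h' := ht 1
        simp [tailsVars] at h'
        simp [List.flatMap, h']
    simp only [if_neg O10]
    have h' := ht 0
    simp [tailsVars] at h'
    simp [List.flatMap, h']

theorem tabB_eq (cs : List Char) : tabB cs = tailsVars cs := by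
  induction cs with
  | nil => rfl
  | cons c cs ih =>
    show (match termB ((c :: cs).take 3) ((c :: cs).length) with
      | some b => b
      | none => (movesB ((c :: cs).take 3)).flatMap
          (fun p => ((tabB cs).getD (p.2 - 1) []).map (fun tail => p.1 ++ tail))) :: tabB cs
      = varsA (c :: cs) :: tailsVars cs
    rw [ih, step_eq c cs (tailsVars cs) (fun k => rfl)]

-- ===== VERDICT =====
theorem variations_spec : Claim_equal_variations := by
  intro word _ hpre
  unfold Spec_variations variations variations_alt
  rw [tabB_eq]
  cases h : word.toList with
  | nil => exact absurd (String.toList_eq_nil_iff.mp h) hpre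
  | cons c cs => simp [tailsVars]
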